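-- pv_equiv track=rewrite | github.com/nayra-0805/MissionDSA | hackerrank/1_sansaandxor.py | sansaXor
-- ===== SOURCE A (Python) =====
-- def sansaXor(arr):
--     ln = len(arr)
--     x = 0
--     i = 0
--
--     if (ln % 2 != 0):
--         while (i < ln):
--             x ^= arr[i]
--             i += 2
--         return x
--
--     return 0
-- ===== SOURCE B (Python) =====
-- def sansaXor(arr):
--     n = len(arr)
--     acc = 0
--     for i, v in enumerate(arr):
--         if ((i + 1) * (n - i)) % 2 == 1:
--             acc ^= v
--     return acc
-- ===== Notes on version B (the rewrite author's own statement) =====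
-- stated objective: alternative
-- what changed: B counts, for each element, the number of subarrays containing it, occ=(i+1)*(n-i), and XORs in exactly the elements with odd occurrence count, instead of A's shortcut of XOR-ing even indices only when the length is odd.
import Mathlib
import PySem

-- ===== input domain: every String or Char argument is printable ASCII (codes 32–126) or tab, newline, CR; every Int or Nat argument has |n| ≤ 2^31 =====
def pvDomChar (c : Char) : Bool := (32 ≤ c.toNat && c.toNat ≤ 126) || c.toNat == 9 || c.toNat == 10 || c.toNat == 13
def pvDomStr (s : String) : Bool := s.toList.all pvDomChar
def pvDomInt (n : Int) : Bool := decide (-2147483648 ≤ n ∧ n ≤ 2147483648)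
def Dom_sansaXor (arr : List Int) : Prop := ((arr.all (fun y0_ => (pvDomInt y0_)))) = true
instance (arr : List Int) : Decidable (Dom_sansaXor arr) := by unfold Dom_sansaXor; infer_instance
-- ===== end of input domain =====

-- B replaces A's even-index-when-odd-length shortcut by counting each element's
-- subarray occurrences occ = (i+1)*(n-i) and XOR-ing in the elements with odd occ.


-- ===== PORT A =====
-- while (i < ln): x ^= arr[i]; i += 2   — the loop only reads indices 0 ≤ i < ln,
-- where pyGet? always returns some, so .getD 0 is exact there.
def sansaLoopA (arr : List Int) (x i : Int) : Int :=
  if i < (arr.length : Int) then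
    sansaLoopA arr (PySem.Int.bxor x ((PySem.List.pyGet? arr i).getD 0)) (i + 2)
  else x
termination_by ((arr.length : Int) - i).toNat
decreasing_by omega

def sansaXor (arr : List Int) : Int :=
  let ln : Int := arr.length
  if PySem.Int.mod ln 2 ≠ 0 then sansaLoopA arr 0 0 else 0

-- ===== PORT B =====
def sansaXor_alt (arr : List Int) : Int :=
  let n : Int := arr.length
  (PySem.List.enumerate arr 0).foldl
    (fun acc p =>
      if PySem.Int.mod ((p.1 + 1) * (n - p.1)) 2 = 1 then PySem.Int.bxor acc p.2 else acc) 0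

-- ===== PRECONDITION & SPEC =====
def Spec_sansaXor (arr : List Int) (out : Int) : Prop := out = sansaXor_alt arr
instance (arr : List Int) (out : Int) : Decidable (Spec_sansaXor arr out) := by unfold Spec_sansaXor; infer_instance

-- ===== CLAIM (what is proved, stated in full; the proofs are below) =====
def Claim_equal_sansaXor : Prop := ∀ (arr : List Int), Dom_sansaXor arr → Spec_sansaXor arr (sansaXor arr)

-- ===== LEMMAS AND PROOFS =====

-- elements at even (resp. odd) positions, in order
mutual
def pvEvens : List Int → List Int
  | [] => []
  | a :: t => a :: pvOdds t
def pvOdds : List Int → List Int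
  | [] => []
  | _ :: t => pvEvens t
end

theorem pvOdds_eq_drop (l : List Int) : pvOdds l = pvEvens (l.drop 1) := by
  cases l <;> simp [pvOdds, pvEvens]

theorem pvEvens_drop_cons (arr : List Int) (m : Nat) (h : m < arr.length) :
    pvEvens (arr.drop m) = arr[m] :: pvEvens (arr.drop (m + 2)) := by
  have hd : arr.drop m = arr[m] :: arr.drop (m + 1) := List.drop_eq_getElem_cons h
  rw [hd, pvEvens, pvOdds_eq_drop, List.drop_drop]

theorem sansaLoopA_eq (arr : List Int) (x i : Int) (hi : 0 ≤ i) :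
    sansaLoopA arr x i = List.foldl PySem.Int.bxor x (pvEvens (arr.drop i.toNat)) := by
  rw [sansaLoopA]
  split
  · rename_i hlt
    have hm : i.toNat < arr.length := by omega
    have hget : PySem.List.pyGet? arr i = some arr[i.toNat] := by
      have hlt' : i < (arr.length : Int) := by omega
      simp [PySem.List.pyGet?, PySem.List.pyIdx?, hi, hlt']
    rw [hget, sansaLoopA_eq arr _ (i + 2) (by omega), pvEvens_drop_cons arr i.toNat hm]
    have : (i + 2).toNat = i.toNat + 2 := by omega
    simp [this, List.foldl]
  · rename_i hge
    have : arr.drop i.toNat = [] := by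
      apply List.drop_eq_nil_of_le; omega
    simp [this, pvEvens]
termination_by ((arr.length : Int) - i).toNat
decreasing_by omega

theorem pvCond_odd (n i : Int) (hn : n % 2 = 1) :
    (PySem.Int.mod ((i + 1) * (n - i)) 2 = 1) ↔ i % 2 = 0 := by
  rw [PySem.Int.mod_eq_emod_of_pos (by norm_num)]
  rw [Int.mul_emod]
  rcases Int.emod_two_eq i with h | h
  · have h1 : (i + 1) % 2 = 1 := by omega
    have h2 : (n - i) % 2 = 1 := by omega
    rw [h1, h2]; norm_num [h]
  · have h1 : (i + 1) % 2 = 0 := by omega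
    rw [h1]; norm_num [h]

theorem pvCond_even (n i : Int) (hn : n % 2 = 0) :
    ¬ (PySem.Int.mod ((i + 1) * (n - i)) 2 = 1) := by
  rw [PySem.Int.mod_eq_emod_of_pos (by norm_num)]
  rw [Int.mul_emod]
  rcases Int.emod_two_eq i with h | h
  · have h2 : (n - i) % 2 = 0 := by omega
    rw [h2]; norm_num
  · have h1 : (i + 1) % 2 = 0 := by omega
    rw [h1]; norm_num

theorem foldB_odd (n : Int) (hn : n % 2 = 1) (l : List Int) (k x : Int) :
    (PySem.List.enumerate l k).foldl
      (fun acc p =>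
        if PySem.Int.mod ((p.1 + 1) * (n - p.1)) 2 = 1 then PySem.Int.bxor acc p.2 else acc) x
    = List.foldl PySem.Int.bxor x (if k % 2 = 0 then pvEvens l else pvOdds l) := by
  induction l generalizing k x with
  | nil => simp [PySem.List.enumerate_nil, pvEvens, pvOdds]
  | cons a t ih =>
    rw [PySem.List.enumerate_cons]
    rcases Int.emod_two_eq k with h | h
    · simp only [List.foldl, (pvCond_odd n k hn).2 h, if_pos, h]
      rw [ih (k + 1) (PySem.Int.bxor x a)]
      have : (k + 1) % 2 ≠ 0 := by omega
      simp [this, pvEvens]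
    · have hc : ¬ (PySem.Int.mod ((k + 1) * (n - k)) 2 = 1) := by
        intro hcc; have := (pvCond_odd n k hn).1 hcc; omega
      have hk0 : ¬ (k % 2 = 0) := by omega
      simp only [List.foldl, hc, if_false]
      rw [ih (k + 1) x]
      have : (k + 1) % 2 = 0 := by omega
      simp [this, hk0, pvOdds]

theorem foldB_even (n : Int) (hn : n % 2 = 0) (l : List Int) (k x : Int) :
    (PySem.List.enumerate l k).foldl
      (fun acc p =>
        if PySem.Int.mod ((p.1 + 1) * (n - p.1)) 2 = 1 then PySem.Int.bxor acc p.2 else acc) x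
    = x := by
  induction l generalizing k x with
  | nil => simp [PySem.List.enumerate_nil]
  | cons a t ih =>
    rw [PySem.List.enumerate_cons]
    simp only [List.foldl, pvCond_even n k hn, if_false]
    exact ih (k + 1) x

-- ===== VERDICT (by name: the statement is the Claim_ definition above) =====
theorem sansaXor_spec : Claim_equal_sansaXor := by
  intro arr _
  show sansaXor arr = sansaXor_alt arr
  unfold sansaXor sansaXor_alt
  have hmod : PySem.Int.mod (arr.length : Int) 2 = (arr.length : Int) % 2 :=
    PySem.Int.mod_eq_emod_of_pos (by norm_num)
  rcases Int.emod_two_eq (arr.length : Int) with h | h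
  · simp only [hmod, h, ne_eq, not_true_eq_false, if_false]
    rw [foldB_even _ h arr 0 0]
  · simp only [hmod, h, ne_eq, if_pos, one_ne_zero, not_false_eq_true]
    rw [foldB_odd _ h arr 0 0, sansaLoopA_eq arr 0 0 le_rfl]
    norm_num
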